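-- pv_equiv track=rewrite | github.com/gudfit/HeavenHellII | src/defense.py | argmax_set_fast
-- ===== SOURCE A (Python) =====
-- def rest_weight_fast(w, inb, g, v):
--     return sum(w[u][v] for u in inb[v] if u != g)
--
-- def max_need_tau_fast(w, inb, g, tau):
--     n = len(w)
--     best_v = -1
--     best_val = -(10**9)
--     for v in range(n):
--         if v == g:
--             continue
--         val = rest_weight_fast(w, inb, g, v) - tau[v]
--         if val > best_val:
--             best_val, best_v = val, v
--     return best_val, best_v
--
-- def argmax_set_fast(w, inb, g, tau):
--     mx, _ = max_need_tau_fast(w, inb, g, tau)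
--     n = len(w)
--     return [
--         v
--         for v in range(n)
--         if v != g and (rest_weight_fast(w, inb, g, v) - tau[v] == mx)
--     ]
-- ===== SOURCE B (Python) =====
-- def argmax_set_fast(w, inb, g, tau):
--     # single pass: maintain the running best value and the list of vertices achieving it
--     best = -(10**9)
--     acc = []
--     for v in range(len(w)):
--         if v == g:
--             continue
--         val = -tau[v]
--         for u in inb[v]:
--             if u != g:
--                 val += w[u][v]
--         if val > best:
--             best, acc = val, [v]
--         elif val == best:
--             acc.append(v)
--     return acc
-- ===== Notes on version B (the rewrite author's own statement) =====
-- stated objective: faster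
-- what changed: Replaces A's two independent scans (a max-finding pass via max_need_tau_fast, then a filtering pass that recomputes every rest-weight) by one single pass that computes each vertex's value once, inlined, and maintains the argmax set incrementally (reset on a strictly larger value, append on a tie).
import Mathlib
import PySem

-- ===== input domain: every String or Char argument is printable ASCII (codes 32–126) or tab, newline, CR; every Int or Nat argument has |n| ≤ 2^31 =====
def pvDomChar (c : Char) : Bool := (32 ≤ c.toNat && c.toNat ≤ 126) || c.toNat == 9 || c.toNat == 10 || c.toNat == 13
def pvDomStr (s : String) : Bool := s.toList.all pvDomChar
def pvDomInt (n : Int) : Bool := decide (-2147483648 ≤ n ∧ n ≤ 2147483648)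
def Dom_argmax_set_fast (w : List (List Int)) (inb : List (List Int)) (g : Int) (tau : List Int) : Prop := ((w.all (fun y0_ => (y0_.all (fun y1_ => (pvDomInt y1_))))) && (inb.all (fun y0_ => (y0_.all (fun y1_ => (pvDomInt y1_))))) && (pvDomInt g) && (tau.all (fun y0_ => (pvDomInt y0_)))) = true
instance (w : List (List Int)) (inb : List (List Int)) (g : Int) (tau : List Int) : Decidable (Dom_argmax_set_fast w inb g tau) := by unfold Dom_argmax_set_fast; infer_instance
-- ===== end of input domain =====

-- B replaces A's two scans (max pass + recomputing filter pass) by one pass keeping the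
-- running best value and the list of vertices achieving it; objective: faster (constant factor).

-- shared index helpers: Python xs[i] (wraparound for negative i; out-of-range excluded by Pre_)
def pvAt (xs : List Int) (i : Int) : Int := (PySem.List.pyGet? xs i).getD 0
def pvRow (xs : List (List Int)) (i : Int) : List Int := (PySem.List.pyGet? xs i).getD []

-- ===== PORT A =====
def rest_weight_fast (w : List (List Int)) (inb : List (List Int)) (g : Int) (v : Int) : Int :=
  (pvRow inb v).foldl (fun s u => if u ≠ g then s + pvAt (pvRow w u) v else s) 0

def max_need_tau_fast (w : List (List Int)) (inb : List (List Int)) (g : Int) (tau : List Int) : Int × Int :=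
  (PySem.List.pyRange 0 (w.length : Int) 1).foldl
    (fun (st : Int × Int) v =>
      if v = g then st
      else
        let val := rest_weight_fast w inb g v - pvAt tau v
        if val > st.1 then (val, v) else st)
    (-(10 ^ 9 : Int), -1)

def argmax_set_fast (w : List (List Int)) (inb : List (List Int)) (g : Int) (tau : List Int) : List Int :=
  let mx := (max_need_tau_fast w inb g tau).1
  (PySem.List.pyRange 0 (w.length : Int) 1).filter
    (fun v => v != g && (rest_weight_fast w inb g v - pvAt tau v == mx))

-- ===== PORT B =====
def argmax_set_fast_alt (w : List (List Int)) (inb : List (List Int)) (g : Int) (tau : List Int) : List Int :=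
  ((PySem.List.pyRange 0 (w.length : Int) 1).foldl
    (fun (st : Int × List Int) v =>
      if v = g then st
      else
        let val := (pvRow inb v).foldl
          (fun s u => if u ≠ g then s + pvAt (pvRow w u) v else s) (-(pvAt tau v))
        if val > st.1 then (val, [v])
        else if val = st.1 then (st.1, st.2 ++ [v])
        else st)
    (-(10 ^ 9 : Int), ([] : List Int))).2

-- ===== PRECONDITION & SPEC =====
-- Pre_ excludes exactly the inputs where A raises IndexError: some needed inb[v]/tau[v]/w[u]/w[u][v] is out of range.
def Pre_argmax_set_fast (w : List (List Int)) (inb : List (List Int)) (g : Int) (tau : List Int) : Prop :=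
  ∀ v ∈ PySem.List.pyRange 0 (w.length : Int) 1, v ≠ g →
    (PySem.List.pyGet? inb v).isSome ∧ (PySem.List.pyGet? tau v).isSome ∧
    ∀ u ∈ pvRow inb v, u ≠ g →
      (PySem.List.pyGet? w u).isSome ∧ (PySem.List.pyGet? (pvRow w u) v).isSome
instance (w : List (List Int)) (inb : List (List Int)) (g : Int) (tau : List Int) : Decidable (Pre_argmax_set_fast w inb g tau) := by unfold Pre_argmax_set_fast; infer_instance
def pvWitness_argmax_set_fast : List (List Int) × List (List Int) × Int × List Int :=
  ([[0, 1], [2, 0]], [[1], [0]], 0, [0, 0])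

def Spec_argmax_set_fast (w : List (List Int)) (inb : List (List Int)) (g : Int) (tau : List Int) (out : List Int) : Prop := out = argmax_set_fast_alt w inb g tau
instance (w : List (List Int)) (inb : List (List Int)) (g : Int) (tau : List Int) (out : List Int) : Decidable (Spec_argmax_set_fast w inb g tau out) := by unfold Spec_argmax_set_fast; infer_instance

-- ===== CLAIM (what is proved, stated in full; the proofs are below) =====
def Claim_equal_argmax_set_fast : Prop := ∀ (w : List (List Int)) (inb : List (List Int)) (g : Int) (tau : List Int), Dom_argmax_set_fast w inb g tau → Pre_argmax_set_fast w inb g tau → Spec_argmax_set_fast w inb g tau (argmax_set_fast w inb g tau)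

-- ===== LEMMAS AND PROOFS =====

-- generic running-max step and B's pair step, over an arbitrary value function f
def pvMstep (f : Int → Int) (g : Int) (b : Int) (v : Int) : Int :=
  if v = g then b else if f v > b then f v else b

def pvBstep (f : Int → Int) (g : Int) (st : Int × List Int) (v : Int) : Int × List Int :=
  if v = g then st
  else if f v > st.1 then (f v, [v])
  else if f v = st.1 then (st.1, st.2 ++ [v])
  else st

theorem pvM_ge (f : Int → Int) (g : Int) : ∀ (L : List Int) (b : Int), b ≤ L.foldl (pvMstep f g) b := by
  intro L
  induction L with
  | nil => intro b; simp
  | cons v rest ih =>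
    intro b
    refine le_trans ?_ (ih (pvMstep f g b v))
    unfold pvMstep; split_ifs <;> omega

theorem pvFold_fst (f : Int → Int) (g : Int) :
    ∀ (L : List Int) (st : Int × Int),
      (L.foldl (fun (st : Int × Int) v => if v = g then st else if f v > st.1 then (f v, v) else st) st).1
        = L.foldl (pvMstep f g) st.1 := by
  intro L
  induction L with
  | nil => intro st; rfl
  | cons v rest ih =>
    intro st
    simp only [List.foldl_cons]
    rw [ih]
    congr 1
    unfold pvMstep; split_ifs <;> rfl

theorem pvBfold_snd (f : Int → Int) (g : Int) :
    ∀ (L : List Int) (b : Int) (acc : List Int),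
      (L.foldl (pvBstep f g) (b, acc)).2
        = (if b < L.foldl (pvMstep f g) b then [] else acc)
            ++ L.filter (fun v => v != g && (f v == L.foldl (pvMstep f g) b)) := by
  intro L
  induction L with
  | nil => intro b acc; simp
  | cons v rest ih =>
    intro b acc
    simp only [List.foldl_cons, List.filter_cons]
    by_cases hg : v = g
    · have h1 : pvBstep f g (b, acc) v = (b, acc) := by unfold pvBstep; simp [hg]
      have h2 : pvMstep f g b v = b := by unfold pvMstep; simp [hg]
      simp only [h1, h2]
      rw [ih]
      simp [hg]
    · have hM := pvM_ge f g rest (pvMstep f g b v)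
      by_cases h1 : f v > b
      · have hs : pvBstep f g (b, acc) v = (f v, [v]) := by unfold pvBstep; simp [hg, h1]
        have hm : pvMstep f g b v = f v := by unfold pvMstep; simp [hg, h1]
        simp only [hs, hm]
        rw [ih]
        rw [hm] at hM
        by_cases he : f v = rest.foldl (pvMstep f g) (f v)
        · simp [hg, ← he, h1]
        · have hlt : f v < rest.foldl (pvMstep f g) (f v) := lt_of_le_of_ne hM he
          simp [hg, he, hlt, lt_of_le_of_lt (le_of_lt h1) hlt]
      · by_cases h2 : f v = b
        · have hs : pvBstep f g (b, acc) v = (b, acc ++ [v]) := by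
            unfold pvBstep; simp [hg, h2]
          have hm : pvMstep f g b v = b := by unfold pvMstep; simp [hg, h1]
          simp only [hs, hm]
          rw [ih]
          rw [hm] at hM
          by_cases he : b = rest.foldl (pvMstep f g) b
          · simp [hg, h2, ← he]
          · have hlt : b < rest.foldl (pvMstep f g) b := lt_of_le_of_ne hM he
            have hne : ¬ (f v = rest.foldl (pvMstep f g) b) := by omega
            simp [hg, hne, hlt]
        · have hs : pvBstep f g (b, acc) v = (b, acc) := by
            unfold pvBstep; simp [hg, h1, h2]
          have hm : pvMstep f g b v = b := by unfold pvMstep; simp [hg, h1]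
          simp only [hs, hm]
          rw [ih]
          rw [hm] at hM
          have hne : ¬ (f v = rest.foldl (pvMstep f g) b) := by omega
          simp [hg, hne]

-- folding the weighted sum from an arbitrary start shifts the result
theorem pvFold_shift (g : Int) (x : Int → Int) :
    ∀ (L : List Int) (a : Int),
      L.foldl (fun s u => if u ≠ g then s + x u else s) a
        = a + L.foldl (fun s u => if u ≠ g then s + x u else s) 0 := by
  intro L
  induction L with
  | nil => intro a; simp
  | cons u rest ih =>
    intro a
    simp only [List.foldl_cons]
    by_cases h : u = g
    · rw [if_neg (fun hn => hn h), if_neg (fun hn => hn h)]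
      exact ih a
    · rw [if_pos h, if_pos h, ih (a + x u), ih (0 + x u)]
      ring

-- B's per-vertex value equals A's rest_weight minus tau
theorem pvVal_eq (w : List (List Int)) (inb : List (List Int)) (g : Int) (tau : List Int) :
    (fun v => (pvRow inb v).foldl
        (fun s u => if u ≠ g then s + pvAt (pvRow w u) v else s) (-(pvAt tau v)))
      = (fun v => rest_weight_fast w inb g v - pvAt tau v) := by
  funext v
  rw [rest_weight_fast, pvFold_shift g (fun u => pvAt (pvRow w u) v) (pvRow inb v) (-(pvAt tau v))]
  ring

-- ===== VERDICT (by name: the statement is the Claim_ definition above) =====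
theorem argmax_set_fast_spec : Claim_equal_argmax_set_fast := by
  intro w inb g tau _ _
  unfold Spec_argmax_set_fast argmax_set_fast argmax_set_fast_alt max_need_tau_fast
  set fA : Int → Int := fun v => rest_weight_fast w inb g v - pvAt tau v with hfA
  have hB :
      ((PySem.List.pyRange 0 (w.length : Int) 1).foldl
        (fun (st : Int × List Int) v =>
          if v = g then st
          else
            let val := (pvRow inb v).foldl
              (fun s u => if u ≠ g then s + pvAt (pvRow w u) v else s) (-(pvAt tau v))
            if val > st.1 then (val, [v])
            else if val = st.1 then (st.1, st.2 ++ [v])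
            else st)
        (-(10 ^ 9 : Int), ([] : List Int)))
      = ((PySem.List.pyRange 0 (w.length : Int) 1).foldl (pvBstep fA g)
          (-(10 ^ 9 : Int), ([] : List Int))) := by
    congr 1
    funext st v
    show (if v = g then st
          else if ((pvRow inb v).foldl
              (fun s u => if u ≠ g then s + pvAt (pvRow w u) v else s) (-(pvAt tau v))) > st.1
            then _ else _) = pvBstep fA g st v
    rw [congrFun (pvVal_eq w inb g tau) v]
    rfl
  have hA :
      ((PySem.List.pyRange 0 (w.length : Int) 1).foldl
        (fun (st : Int × Int) v =>
          if v = g then st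
          else
            let val := rest_weight_fast w inb g v - pvAt tau v
            if val > st.1 then (val, v) else st)
        (-(10 ^ 9 : Int), -1)).1
      = (PySem.List.pyRange 0 (w.length : Int) 1).foldl (pvMstep fA g) (-(10 ^ 9 : Int)) := by
    exact pvFold_fst fA g _ _
  rw [hB, pvBfold_snd fA g]
  simp only [hA]
  split_ifs <;> rfl
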